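-- pv_equiv track=rewrite | github.com/chasemcd/mug | interactive_gym/server/admin/aggregator.py | _compute_session_health
-- ===== SOURCE A (Python) =====
-- def _compute_session_health(p2p_health: dict) -> str:
--     """
--     Compute overall session health from individual player health reports.
--
--     Args:
--         p2p_health: Dict of player_id -> health_data
--
--     Returns:
--         'healthy' if all players healthy
--         'degraded' if any degraded or using SocketIO fallback
--         'reconnecting' if any reconnecting
--     """
--     if not p2p_health:
--         return 'healthy'  # No data means assume healthy
--
--     has_reconnecting = False
--     has_degraded = False
--
--     for health_data in p2p_health.values():
--         status = health_data.get('status', 'healthy')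
--         conn_type = health_data.get('connection_type', '')
--
--         if status == 'reconnecting':
--             has_reconnecting = True
--         elif status == 'degraded' or conn_type == 'socketio_fallback':
--             has_degraded = True
--
--     if has_reconnecting:
--         return 'reconnecting'
--     if has_degraded:
--         return 'degraded'
--     return 'healthy'
-- ===== SOURCE B (Python) =====
-- def _compute_session_health(p2p_health: dict) -> str:
--     # Two short-circuiting predicate scans instead of a flag-accumulating loop.
--     if any(h.get('status', 'healthy') == 'reconnecting' for h in p2p_health.values()):
--         return 'reconnecting'
--     if any(h.get('status', 'healthy') == 'degraded'
--            or h.get('connection_type', '') == 'socketio_fallback'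
--            for h in p2p_health.values()):
--         return 'degraded'
--     return 'healthy'
-- ===== Notes on version B (the rewrite author's own statement) =====
-- stated objective: simpler
-- what changed: Replaces the flag-accumulating loop (plus an explicit empty-dict guard) with two short-circuiting any() predicate scans and no guard; the elif suppression of 'degraded' on reconnecting players is irrelevant because 'reconnecting' has priority.
import Mathlib
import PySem

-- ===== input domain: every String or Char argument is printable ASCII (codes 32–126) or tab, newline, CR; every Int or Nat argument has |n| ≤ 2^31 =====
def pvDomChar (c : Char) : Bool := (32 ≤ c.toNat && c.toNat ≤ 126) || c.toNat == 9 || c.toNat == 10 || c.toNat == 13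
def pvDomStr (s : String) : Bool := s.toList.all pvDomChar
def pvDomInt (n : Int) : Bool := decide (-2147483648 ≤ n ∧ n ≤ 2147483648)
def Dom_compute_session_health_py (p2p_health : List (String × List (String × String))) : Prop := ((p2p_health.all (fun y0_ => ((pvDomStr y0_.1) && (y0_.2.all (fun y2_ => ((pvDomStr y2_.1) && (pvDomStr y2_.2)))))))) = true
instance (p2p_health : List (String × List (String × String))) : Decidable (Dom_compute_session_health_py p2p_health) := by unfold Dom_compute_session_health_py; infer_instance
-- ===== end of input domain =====

-- B replaces A's flag-accumulating loop with two any-scans; the empty-dict guard is dropped (simpler, same O(n)).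

-- ===== PORT A =====
-- helper predicates shared by both ports only as in their Pythons: each port reads
-- the inner dict with Python's .get via PySem.Dict.getD.
def pvReconA (hd : List (String × String)) : Bool :=
  (PySem.Dict.ofList hd).getD "status" "healthy" == "reconnecting"
def pvDegA (hd : List (String × String)) : Bool :=
  (PySem.Dict.ofList hd).getD "status" "healthy" == "degraded"
    || (PySem.Dict.ofList hd).getD "connection_type" "" == "socketio_fallback"

def compute_session_health_py (p2p_health : List (String × List (String × String))) : String :=
  if p2p_health.isEmpty then "healthy"
  else
    let flags := (PySem.Dict.ofList p2p_health).values.foldl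
      (fun (acc : Bool × Bool) hd =>
        if pvReconA hd then (true, acc.2)
        else if pvDegA hd then (acc.1, true)
        else acc) (false, false)
    if flags.1 then "reconnecting"
    else if flags.2 then "degraded"
    else "healthy"

-- ===== PORT B =====
def compute_session_health_py_alt (p2p_health : List (String × List (String × String))) : String :=
  let vals := (PySem.Dict.ofList p2p_health).values
  if vals.any pvReconA then "reconnecting"
  else if vals.any pvDegA then "degraded"
  else "healthy"

-- ===== PRECONDITION & SPEC =====
def Spec_compute_session_health_py (p2p_health : List (String × List (String × String))) (out : String) : Prop := out = compute_session_health_py_alt p2p_health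
instance (p2p_health : List (String × List (String × String))) (out : String) : Decidable (Spec_compute_session_health_py p2p_health out) := by unfold Spec_compute_session_health_py; infer_instance

-- ===== CLAIM (what is proved, stated in full; the proofs are below) =====
def Claim_equal_compute_session_health_py : Prop := ∀ (p2p_health : List (String × List (String × String))), Dom_compute_session_health_py p2p_health → Spec_compute_session_health_py p2p_health (compute_session_health_py p2p_health)

-- ===== LEMMAS AND PROOFS =====

-- the accumulated flags are (a || any reconnecting, b || any (degraded-and-not-reconnecting))
theorem pv_foldl_flags (vs : List (List (String × String))) (a b : Bool) :
    vs.foldl (fun (acc : Bool × Bool) hd =>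
        if pvReconA hd then (true, acc.2)
        else if pvDegA hd then (acc.1, true)
        else acc) (a, b)
      = (a || vs.any pvReconA, b || vs.any (fun hd => !pvReconA hd && pvDegA hd)) := by
  induction vs generalizing a b with
  | nil => simp
  | cons hd tl ih =>
      by_cases hr : pvReconA hd
      · simp [hr, ih]
      · by_cases hdg : pvDegA hd <;> simp [hr, hdg, ih]

theorem pv_any_deg_of_no_recon (vs : List (List (String × String)))
    (h : vs.any pvReconA = false) :
    vs.any (fun hd => !pvReconA hd && pvDegA hd) = vs.any pvDegA := by
  induction vs with
  | nil => rfl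
  | cons hd tl ih =>
      simp only [List.any_cons, Bool.or_eq_false_iff] at h
      simp [List.any_cons, h.1, ih h.2]

-- ===== VERDICT (by name: the statement is the Claim_ definition above) =====
theorem compute_session_health_py_spec : Claim_equal_compute_session_health_py := by
  intro p _
  unfold Spec_compute_session_health_py compute_session_health_py compute_session_health_py_alt
  by_cases hp : p.isEmpty
  · have : p = [] := List.isEmpty_iff.mp hp
    subst this
    simp [PySem.Dict.ofList, PySem.Dict.update, PySem.Dict.empty, PySem.Dict.values]
  · simp only [hp]
    simp only [Bool.false_eq_true, if_false]
    rw [pv_foldl_flags]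
    set vs := (PySem.Dict.ofList p).values with hvs
    by_cases hr : vs.any pvReconA
    · simp [hr]
    · simp only [Bool.not_eq_true] at hr
      simp [hr, pv_any_deg_of_no_recon vs hr]
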